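-- pv_equiv track=rewrite | github.com/SABR-Lab/FaultLocalizationIndustry | bugzilla_bugs_analysis/modified_method_coverage_tests.py | count_methods_by_status
-- ===== SOURCE A (Python) =====
-- from typing import Dict, List, Optional, Set
--
-- def count_methods_by_status(coverage_data: Dict) -> Dict:
--     """Count methods by coverage status"""
--     counts = {'covered': 0, 'uncovered': 0, 'not_instrumented': 0, 'no_coverage_data': 0}
--
--     for method in coverage_data.get('modified_methods', []):
--         status = method.get('coverage_status', 'no_coverage_data')
--         if status in counts:
--             counts[status] += 1
--         else:
--             counts['no_coverage_data'] += 1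
--
--     return counts
-- ===== SOURCE B (Python) =====
-- def count_methods_by_status(coverage_data):
--     """Count methods by coverage status"""
--     statuses = [m.get('coverage_status', 'no_coverage_data')
--                 for m in coverage_data.get('modified_methods', [])]
--     covered = statuses.count('covered')
--     uncovered = statuses.count('uncovered')
--     not_instrumented = statuses.count('not_instrumented')
--     return {'covered': covered,
--             'uncovered': uncovered,
--             'not_instrumented': not_instrumented,
--             'no_coverage_data': len(statuses) - covered - uncovered - not_instrumented}
-- ===== Notes on version B (the rewrite author's own statement) =====
-- stated objective: simpler
-- what changed: Drops A's mutable four-bucket dict accumulator entirely: B extracts the status list once, counts each of the three known statuses with separate list.count passes, and derives no_coverage_data by subtraction from the total length.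
import Mathlib
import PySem

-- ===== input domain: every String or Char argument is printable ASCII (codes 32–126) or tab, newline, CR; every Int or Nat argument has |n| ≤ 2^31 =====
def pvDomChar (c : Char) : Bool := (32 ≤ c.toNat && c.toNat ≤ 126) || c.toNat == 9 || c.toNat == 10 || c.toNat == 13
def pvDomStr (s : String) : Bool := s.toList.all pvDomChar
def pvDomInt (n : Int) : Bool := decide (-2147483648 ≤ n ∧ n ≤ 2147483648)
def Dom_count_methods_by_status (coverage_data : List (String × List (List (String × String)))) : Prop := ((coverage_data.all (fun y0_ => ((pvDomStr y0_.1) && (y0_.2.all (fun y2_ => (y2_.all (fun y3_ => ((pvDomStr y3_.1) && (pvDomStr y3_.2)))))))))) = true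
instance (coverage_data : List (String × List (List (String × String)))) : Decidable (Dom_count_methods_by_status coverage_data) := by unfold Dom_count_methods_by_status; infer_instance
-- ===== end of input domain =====

-- B drops A's mutable four-bucket accumulator: it extracts the status list once, counts
-- the three known statuses with separate count passes, and derives no_coverage_data by
-- subtraction from the total; same values, a plainer staged decomposition.

-- ===== PORT A =====
def count_methods_by_status (coverage_data : List (String × List (List (String × String)))) : List (String × Int) :=
  let counts : PySem.Dict String Int :=
    PySem.Dict.ofList [("covered", 0), ("uncovered", 0), ("not_instrumented", 0), ("no_coverage_data", 0)]
  let counts := (PySem.Dict.getD (PySem.Dict.ofList coverage_data) "modified_methods" []).foldl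
    (fun counts method =>
      let status := PySem.Dict.getD (PySem.Dict.ofList method) "coverage_status" "no_coverage_data"
      if counts.contains status then
        counts.modify status 0 (· + 1)
      else
        counts.modify "no_coverage_data" 0 (· + 1)) counts
  counts.items

-- ===== PORT B =====
def count_methods_by_status_alt (coverage_data : List (String × List (List (String × String)))) : List (String × Int) :=
  let statuses := (PySem.Dict.getD (PySem.Dict.ofList coverage_data) "modified_methods" []).map
    (fun m => PySem.Dict.getD (PySem.Dict.ofList m) "coverage_status" "no_coverage_data")
  let covered : Int := PySem.List.count statuses "covered"
  let uncovered : Int := PySem.List.count statuses "uncovered"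
  let not_instrumented : Int := PySem.List.count statuses "not_instrumented"
  [("covered", covered), ("uncovered", uncovered), ("not_instrumented", not_instrumented),
   ("no_coverage_data", (statuses.length : Int) - covered - uncovered - not_instrumented)]

-- ===== PRECONDITION & SPEC =====
def Spec_count_methods_by_status (coverage_data : List (String × List (List (String × String)))) (out : List (String × Int)) : Prop := out = count_methods_by_status_alt coverage_data
instance (coverage_data : List (String × List (List (String × String)))) (out : List (String × Int)) : Decidable (Spec_count_methods_by_status coverage_data out) := by unfold Spec_count_methods_by_status; infer_instance

-- ===== CLAIM =====
def Claim_equal_count_methods_by_status : Prop := ∀ (coverage_data : List (String × List (List (String × String)))), Dom_count_methods_by_status coverage_data → Spec_count_methods_by_status coverage_data (count_methods_by_status coverage_data)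

-- ===== LEMMAS AND PROOFS =====

-- One iteration of A's loop on the four-key literal dict.
theorem stepA_lit (a b c d : Int) (st : String) :
    (let status := st;
     if (PySem.Dict.mk [("covered", a), ("uncovered", b), ("not_instrumented", c), ("no_coverage_data", d)]).contains status then
       (PySem.Dict.mk [("covered", a), ("uncovered", b), ("not_instrumented", c), ("no_coverage_data", d)]).modify status 0 (· + 1)
     else
       (PySem.Dict.mk [("covered", a), ("uncovered", b), ("not_instrumented", c), ("no_coverage_data", d)]).modify "no_coverage_data" 0 (· + 1))
    = PySem.Dict.mk
        [("covered", a + (if st = "covered" then 1 else 0)),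
         ("uncovered", b + (if st = "uncovered" then 1 else 0)),
         ("not_instrumented", c + (if st = "not_instrumented" then 1 else 0)),
         ("no_coverage_data", d + (if st = "covered" ∨ st = "uncovered" ∨ st = "not_instrumented" then 0 else 1))] := by
  by_cases h1 : st = "covered"
  · subst h1; simp [PySem.Dict.contains, PySem.Dict.modify, PySem.Dict.getD, PySem.Dict.get?, PySem.Dict.insert]
  · by_cases h2 : st = "uncovered"
    · subst h2; simp [PySem.Dict.contains, PySem.Dict.modify, PySem.Dict.getD, PySem.Dict.get?, PySem.Dict.insert]
    · by_cases h3 : st = "not_instrumented"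
      · subst h3; simp [PySem.Dict.contains, PySem.Dict.modify, PySem.Dict.getD, PySem.Dict.get?, PySem.Dict.insert]
      · by_cases h4 : st = "no_coverage_data"
        · subst h4; simp [PySem.Dict.contains, PySem.Dict.modify, PySem.Dict.getD, PySem.Dict.get?, PySem.Dict.insert]
        · simp [PySem.Dict.contains, PySem.Dict.modify, PySem.Dict.getD, PySem.Dict.get?, PySem.Dict.insert,
            h1, h2, h3, Ne.symm h1, Ne.symm h2, Ne.symm h3, Ne.symm h4]

-- A's loop, started from the four-key literal dict, characterised by status counts.
theorem foldA_char (ms : List (List (String × String))) (a b c d : Int) :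
    ms.foldl
      (fun counts method =>
        let status := PySem.Dict.getD (PySem.Dict.ofList method) "coverage_status" "no_coverage_data"
        if counts.contains status then
          counts.modify status 0 (· + 1)
        else
          counts.modify "no_coverage_data" 0 (· + 1))
      (PySem.Dict.mk [("covered", a), ("uncovered", b), ("not_instrumented", c), ("no_coverage_data", d)])
    = PySem.Dict.mk
        [("covered", a + ((ms.map (fun m => PySem.Dict.getD (PySem.Dict.ofList m) "coverage_status" "no_coverage_data")).count "covered" : Int)),
         ("uncovered", b + ((ms.map (fun m => PySem.Dict.getD (PySem.Dict.ofList m) "coverage_status" "no_coverage_data")).count "uncovered" : Int)),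
         ("not_instrumented", c + ((ms.map (fun m => PySem.Dict.getD (PySem.Dict.ofList m) "coverage_status" "no_coverage_data")).count "not_instrumented" : Int)),
         ("no_coverage_data", d + ((ms.length : Int)
            - ((ms.map (fun m => PySem.Dict.getD (PySem.Dict.ofList m) "coverage_status" "no_coverage_data")).count "covered" : Int)
            - ((ms.map (fun m => PySem.Dict.getD (PySem.Dict.ofList m) "coverage_status" "no_coverage_data")).count "uncovered" : Int)
            - ((ms.map (fun m => PySem.Dict.getD (PySem.Dict.ofList m) "coverage_status" "no_coverage_data")).count "not_instrumented" : Int)))] := by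
  induction ms generalizing a b c d with
  | nil => simp
  | cons m t ih =>
    simp only [List.foldl_cons, List.map_cons, List.length_cons]
    generalize (PySem.Dict.getD (PySem.Dict.ofList m) "coverage_status" "no_coverage_data") = st
    rw [stepA_lit, ih]
    apply PySem.Dict.ext
    simp only [List.count_cons, beq_iff_eq]
    split_ifs <;> simp_all <;> omega

-- ===== VERDICT =====
theorem count_methods_by_status_spec : Claim_equal_count_methods_by_status := by
  intro cd _
  show count_methods_by_status cd = count_methods_by_status_alt cd
  simp only [count_methods_by_status, count_methods_by_status_alt]
  rw [show (PySem.Dict.ofList [("covered", (0:Int)), ("uncovered", 0), ("not_instrumented", 0), ("no_coverage_data", 0)]) = PySem.Dict.mk [("covered", 0), ("uncovered", 0), ("not_instrumented", 0), ("no_coverage_data", 0)] from rfl]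
  rw [foldA_char]
  simp [PySem.List.count_eq]
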